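-- pv_equiv track=rewrite | github.com/Dalyourprogrammer/AI_Class | Sprint4/Minimax/game.py | get_reachable_with_dist
-- ===== SOURCE A (Python) =====
-- from collections import deque
--
-- GRID_SIZE = 5
--
-- DIRECTIONS = [(-1, 0), (1, 0), (0, -1), (0, 1)]
--
-- def in_bounds(r: int, c: int) -> bool:
--     return 0 <= r < GRID_SIZE and 0 <= c < GRID_SIZE
--
-- def get_reachable_with_dist(from_pos: tuple, max_steps: int, blocked: frozenset) -> dict:
--     """BFS: returns {pos: min_dist} for all cells reachable within max_steps, including from_pos (dist 0)."""
--     dists = {from_pos: 0}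
--     frontier = deque([(from_pos, 0)])
--
--     while frontier:
--         pos, dist = frontier.popleft()
--         if dist == max_steps:
--             continue
--         r, c = pos
--         for dr, dc in DIRECTIONS:
--             nr, nc = r + dr, c + dc
--             npos = (nr, nc)
--             if in_bounds(nr, nc) and npos not in blocked and npos not in dists:
--                 dists[npos] = dist + 1
--                 frontier.append((npos, dist + 1))
--
--     return dists
-- ===== SOURCE B (Python) =====
-- GRID_SIZE = 5
--
-- DIRECTIONS = [(-1, 0), (1, 0), (0, -1), (0, 1)]
--
-- def in_bounds(r, c):
--     return 0 <= r < GRID_SIZE and 0 <= c < GRID_SIZE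
--
-- def get_reachable_with_dist(from_pos, max_steps, blocked):
--     """Naive closure iteration: repeatedly rescan the whole dict, adding the
--     eligible neighbours of every recorded cell, until a full pass adds nothing."""
--     dists = {from_pos: 0}
--     while True:
--         snapshot = list(dists.items())
--         for (r, c), d in snapshot:
--             if d != max_steps:
--                 for dr, dc in DIRECTIONS:
--                     npos = (r + dr, c + dc)
--                     if in_bounds(*npos) and npos not in blocked and npos not in dists:
--                         dists[npos] = d + 1
--         if len(dists) == len(snapshot):
--             return dists
-- ===== Notes on version B (the rewrite author's own statement) =====
-- stated objective: alternative
-- what changed: Replaced the deque-driven BFS (pop one (pos,dist) node at a time from a worklist queue) with a queue-free naive closure iteration: repeatedly rescan the entire dict of recorded cells, adding every eligible neighbour of every entry, until a full pass adds no new cell; each cell's distance comes from its discoverer's recorded distance.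
import Mathlib
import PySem

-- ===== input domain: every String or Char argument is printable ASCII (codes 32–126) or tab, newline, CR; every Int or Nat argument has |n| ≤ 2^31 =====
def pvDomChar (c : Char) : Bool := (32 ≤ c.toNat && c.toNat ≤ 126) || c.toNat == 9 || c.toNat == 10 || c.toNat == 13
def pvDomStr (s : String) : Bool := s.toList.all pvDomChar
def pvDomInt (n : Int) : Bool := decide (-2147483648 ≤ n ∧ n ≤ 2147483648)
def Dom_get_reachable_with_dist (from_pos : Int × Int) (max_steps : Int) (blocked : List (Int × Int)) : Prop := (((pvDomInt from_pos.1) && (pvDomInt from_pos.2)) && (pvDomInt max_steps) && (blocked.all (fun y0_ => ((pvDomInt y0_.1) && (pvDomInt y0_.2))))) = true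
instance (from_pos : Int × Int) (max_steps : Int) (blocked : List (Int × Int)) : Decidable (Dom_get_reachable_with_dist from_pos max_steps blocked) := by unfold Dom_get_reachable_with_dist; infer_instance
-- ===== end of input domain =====

-- B replaces A's deque-driven BFS by a queue-free naive closure iteration: rescan the whole
-- dict once per pass, adding eligible neighbours of every entry, until a pass adds nothing.


-- ===== PORT A =====
def pvGRID_SIZE : Int := 5

def pvDIRECTIONS : List (Int × Int) := [(-1, 0), (1, 0), (0, -1), (0, 1)]

def in_bounds (r c : Int) : Bool :=
  decide (0 ≤ r ∧ r < pvGRID_SIZE) && decide (0 ≤ c ∧ c < pvGRID_SIZE)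

-- body of A's inner `for dr, dc in DIRECTIONS` loop; state = (dists, frontier deque)
def bodyA (blocked : List (Int × Int)) (dist : Int) (pos : Int × Int)
    (st : PySem.Dict (Int × Int) Int × List ((Int × Int) × Int)) (dd : Int × Int) :
    PySem.Dict (Int × Int) Int × List ((Int × Int) × Int) :=
  let nr := pos.1 + dd.1
  let nc := pos.2 + dd.2
  let npos := (nr, nc)
  if in_bounds nr nc && !(decide (npos ∈ blocked)) && !(st.1.contains npos) then
    (st.1.insert npos (dist + 1), st.2 ++ [(npos, dist + 1)])
  else st

-- A's `while frontier` loop: pop left, skip at max_steps, else run the direction loop.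
-- Fuel is a totality guard only: 131 is sufficient (the dict never exceeds 26 keys, see proofs).
def bfsA (max_steps : Int) (blocked : List (Int × Int)) :
    Nat → PySem.Dict (Int × Int) Int → List ((Int × Int) × Int) → PySem.Dict (Int × Int) Int
  | _, dists, [] => dists
  | 0, dists, _ :: _ => dists
  | f + 1, dists, (pos, dist) :: rest =>
    if dist = max_steps then bfsA max_steps blocked f dists rest
    else
      let st := List.foldl (bodyA blocked dist pos) (dists, rest) pvDIRECTIONS
      bfsA max_steps blocked f st.1 st.2

def get_reachable_with_dist (from_pos : Int × Int) (max_steps : Int) (blocked : List (Int × Int)) : List (Int × Int × Int) :=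
  let dists : PySem.Dict (Int × Int) Int := PySem.Dict.ofList [(from_pos, 0)]
  (bfsA max_steps blocked 131 dists [(from_pos, 0)]).items.map (fun p => (p.1.1, p.1.2, p.2))

-- ===== PORT B =====
-- body of B's inner `for dr, dc in DIRECTIONS` loop: add one eligible neighbour
def nbrB (blocked : List (Int × Int)) (dist : Int) (pos : Int × Int)
    (dists : PySem.Dict (Int × Int) Int) (dd : Int × Int) : PySem.Dict (Int × Int) Int :=
  let npos := (pos.1 + dd.1, pos.2 + dd.2)
  if in_bounds npos.1 npos.2 && !(decide (npos ∈ blocked)) && !(dists.contains npos) then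
    dists.insert npos (dist + 1)
  else dists

-- body of B's `for (r, c), d in snapshot` loop
def entryB (max_steps : Int) (blocked : List (Int × Int))
    (dists : PySem.Dict (Int × Int) Int) (e : (Int × Int) × Int) : PySem.Dict (Int × Int) Int :=
  if e.2 ≠ max_steps then List.foldl (nbrB blocked e.2 e.1) dists pvDIRECTIONS else dists

-- B's `while True` loop: one full pass over a snapshot of the dict per iteration; stop when
-- the pass added nothing. Fuel is a totality guard only: 40 passes are sufficient.
def closureB (max_steps : Int) (blocked : List (Int × Int)) :
    Nat → PySem.Dict (Int × Int) Int → PySem.Dict (Int × Int) Int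
  | 0, dists => dists
  | f + 1, dists =>
    let snapshot := dists.items
    let dists' := List.foldl (entryB max_steps blocked) dists snapshot
    if dists'.size = snapshot.length then dists' else closureB max_steps blocked f dists'

def get_reachable_with_dist_alt (from_pos : Int × Int) (max_steps : Int) (blocked : List (Int × Int)) : List (Int × Int × Int) :=
  let dists : PySem.Dict (Int × Int) Int := PySem.Dict.ofList [(from_pos, 0)]
  (closureB max_steps blocked 40 dists).items.map (fun p => (p.1.1, p.1.2, p.2))

-- ===== PRECONDITION & SPEC =====
def Spec_get_reachable_with_dist (from_pos : Int × Int) (max_steps : Int) (blocked : List (Int × Int)) (out : List (Int × Int × Int)) : Prop := out = get_reachable_with_dist_alt from_pos max_steps blocked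
instance (from_pos : Int × Int) (max_steps : Int) (blocked : List (Int × Int)) (out : List (Int × Int × Int)) : Decidable (Spec_get_reachable_with_dist from_pos max_steps blocked out) := by unfold Spec_get_reachable_with_dist; infer_instance

-- ===== CLAIM (what is proved, stated in full; the proofs are below) =====
def Claim_equal_get_reachable_with_dist : Prop := ∀ (from_pos : Int × Int) (max_steps : Int) (blocked : List (Int × Int)), Dom_get_reachable_with_dist from_pos max_steps blocked → Spec_get_reachable_with_dist from_pos max_steps blocked (get_reachable_with_dist from_pos max_steps blocked)

-- ===== LEMMAS AND PROOFS =====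

-- proof-side intermediate: level-synchronous BFS (frontier of positions per distance level)
def bodyL (bl : List (Int × Int)) (s : Int) (pos : Int × Int)
    (st : PySem.Dict (Int × Int) Int × List (Int × Int)) (dd : Int × Int) :
    PySem.Dict (Int × Int) Int × List (Int × Int) :=
  let npos := (pos.1 + dd.1, pos.2 + dd.2)
  if in_bounds npos.1 npos.2 && !(decide (npos ∈ bl)) && !(st.1.contains npos) then
    (st.1.insert npos (s + 1), st.2 ++ [npos])
  else st

def stepL (bl : List (Int × Int)) (s : Int)
    (st : PySem.Dict (Int × Int) Int × List (Int × Int)) (pos : Int × Int) :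
    PySem.Dict (Int × Int) Int × List (Int × Int) :=
  List.foldl (bodyL bl s pos) st pvDIRECTIONS

def bfsL (max_steps : Int) (blocked : List (Int × Int)) :
    Nat → PySem.Dict (Int × Int) Int → List (Int × Int) → Int → PySem.Dict (Int × Int) Int
  | 0, dists, _, _ => dists
  | f + 1, dists, frontier, step =>
    if frontier = [] ∨ step = max_steps then dists
    else
      let st := List.foldl (stepL blocked step) (dists, []) frontier
      bfsL max_steps blocked f st.1 st.2 (step + 1)

lemma bfsA_nil (ms : Int) (bl : List (Int × Int)) (f : Nat) (d : PySem.Dict (Int × Int) Int) :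
    bfsA ms bl f d [] = d := by cases f <;> rfl

-- the direction loops of A and of the level BFS run in lockstep
lemma dirs_rel (bl : List (Int × Int)) (s : Int) (pos : Int × Int) :
    ∀ (dirs : List (Int × Int)) (d : PySem.Dict (Int × Int) Int)
      (q : List ((Int × Int) × Int)) (acc : List (Int × Int)),
    ∃ ns : List (Int × Int),
      List.foldl (bodyA bl s pos) (d, q) dirs
        = ((List.foldl (bodyL bl s pos) (d, acc) dirs).1, q ++ ns.map (fun p => (p, s + 1)))
      ∧ (List.foldl (bodyL bl s pos) (d, acc) dirs).2 = acc ++ ns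
      ∧ (List.foldl (bodyL bl s pos) (d, acc) dirs).1.items = d.items ++ ns.map (fun p => (p, s + 1))
      ∧ (∀ p ∈ ns, in_bounds p.1 p.2 = true)
      ∧ (d.keys.Nodup → (List.foldl (bodyL bl s pos) (d, acc) dirs).1.keys.Nodup) := by
  intro dirs
  induction dirs with
  | nil => intro d q acc; exact ⟨[], by simp⟩
  | cons dd dirs ih =>
    intro d q acc
    simp only [List.foldl_cons, bodyA, bodyL]
    by_cases hg : (in_bounds (pos.1 + dd.1) (pos.2 + dd.2) &&
        !(decide ((pos.1 + dd.1, pos.2 + dd.2) ∈ bl)) &&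
        !(d.contains (pos.1 + dd.1, pos.2 + dd.2))) = true
    · simp only [hg, if_true]
      have hcont : d.contains (pos.1 + dd.1, pos.2 + dd.2) = false := by
        simp only [Bool.and_eq_true, Bool.not_eq_true'] at hg; exact hg.2
      have hin : in_bounds (pos.1 + dd.1) (pos.2 + dd.2) = true := by
        simp only [Bool.and_eq_true] at hg; exact hg.1.1
      obtain ⟨ns', h1, h2, h3, h4, h5⟩ :=
        ih (d.insert (pos.1 + dd.1, pos.2 + dd.2) (s + 1))
          (q ++ [((pos.1 + dd.1, pos.2 + dd.2), s + 1)])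
          (acc ++ [(pos.1 + dd.1, pos.2 + dd.2)])
      refine ⟨(pos.1 + dd.1, pos.2 + dd.2) :: ns', ?_, ?_, ?_, ?_, ?_⟩
      · rw [h1]; simp
      · rw [h2]; simp
      · rw [h3, PySem.Dict.items_insert_of_not_contains d _ hcont]; simp
      · intro p hp
        rcases List.mem_cons.mp hp with rfl | hp
        · exact hin
        · exact h4 p hp
      · intro hnd
        exact h5 (PySem.Dict.nodup_keys_insert d _ _ hnd)
    · simp only [hg]
      exact ih d q acc

-- one unfolding step of A's loop on a nonempty deque
lemma bfsA_cons (ms : Int) (bl : List (Int × Int)) (f : Nat) (d : PySem.Dict (Int × Int) Int)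
    (pos : Int × Int) (dist : Int) (rest : List ((Int × Int) × Int)) :
    bfsA ms bl (f + 1) d ((pos, dist) :: rest)
      = if dist = ms then bfsA ms bl f d rest
        else
          let st := List.foldl (bodyA bl dist pos) (d, rest) pvDIRECTIONS
          bfsA ms bl f st.1 st.2 := rfl

-- A consumes one whole level of its deque exactly as the level fold does.
lemma level_rel (ms : Int) (bl : List (Int × Int)) (s : Int) (hms : s ≠ ms) :
    ∀ (cur : List (Int × Int)) (d : PySem.Dict (Int × Int) Int)
      (acc : List (Int × Int)) (f : Nat),
    ∃ ns : List (Int × Int),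
      bfsA ms bl (f + cur.length) d
          (cur.map (fun p => (p, s)) ++ acc.map (fun p => (p, s + 1)))
        = bfsA ms bl f (List.foldl (stepL bl s) (d, acc) cur).1
            ((List.foldl (stepL bl s) (d, acc) cur).2.map (fun p => (p, s + 1)))
      ∧ (List.foldl (stepL bl s) (d, acc) cur).2 = acc ++ ns
      ∧ (List.foldl (stepL bl s) (d, acc) cur).1.items = d.items ++ ns.map (fun p => (p, s + 1))
      ∧ (∀ p ∈ ns, in_bounds p.1 p.2 = true)
      ∧ (d.keys.Nodup → (List.foldl (stepL bl s) (d, acc) cur).1.keys.Nodup) := by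
  intro cur
  induction cur with
  | nil => intro d acc f; exact ⟨[], by simp⟩
  | cons pos cur ih =>
    intro d acc f
    obtain ⟨ns₁, g1, g2, g3, g4, g5⟩ := dirs_rel bl s pos pvDIRECTIONS d
      (cur.map (fun p => (p, s)) ++ acc.map (fun p => (p, s + 1))) acc
    obtain ⟨ns₂, h1, h2, h3, h4, h5⟩ :=
      ih (List.foldl (bodyL bl s pos) (d, acc) pvDIRECTIONS).1
         (List.foldl (bodyL bl s pos) (d, acc) pvDIRECTIONS).2 f
    have hfold : List.foldl (stepL bl s) (d, acc) (pos :: cur)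
        = List.foldl (stepL bl s)
            ((List.foldl (bodyL bl s pos) (d, acc) pvDIRECTIONS).1,
             (List.foldl (bodyL bl s pos) (d, acc) pvDIRECTIONS).2) cur := by
      simp [stepL]
    refine ⟨ns₁ ++ ns₂, ?_, ?_, ?_, ?_, ?_⟩
    · have : (f + cur.length) + 1 = f + (pos :: cur).length := by simp; omega
      rw [← this] at *
      rw [List.map_cons, List.cons_append, bfsA_cons, if_neg hms]
      simp only [g1]
      rw [hfold]
      rw [show (cur.map (fun p => (p, s)) ++ acc.map (fun p => (p, s + 1)))
            ++ ns₁.map (fun p => (p, s + 1))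
          = cur.map (fun p => (p, s))
            ++ ((List.foldl (bodyL bl s pos) (d, acc) pvDIRECTIONS).2).map
                 (fun p => (p, s + 1)) by rw [g2]; simp]
      exact h1
    · rw [hfold, h2, g2]; simp
    · rw [hfold, h3, g3]; simp
    · intro p hp
      rcases List.mem_append.mp hp with hp | hp
      · exact g4 p hp
      · exact h4 p hp
    · intro hnd
      rw [hfold]
      exact h5 (g5 hnd)

-- A skips (pops without expanding) a whole level whose distance is max_steps.
lemma bfsA_skip (ms : Int) (bl : List (Int × Int)) :
    ∀ (cur : List (Int × Int)) (f : Nat) (d : PySem.Dict (Int × Int) Int),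
    bfsA ms bl (f + cur.length) d (cur.map (fun p => (p, ms))) = d := by
  intro cur
  induction cur with
  | nil => intro f d; exact bfsA_nil ms bl f d
  | cons pos cur ih =>
    intro f d
    have : f + (pos :: cur).length = (f + cur.length) + 1 := by simp; omega
    rw [this, List.map_cons, bfsA_cons, if_pos rfl]
    exact ih f d

lemma bfsL_nil (ms : Int) (bl : List (Int × Int)) (f : Nat) (d : PySem.Dict (Int × Int) Int)
    (s : Int) : bfsL ms bl f d [] s = d := by cases f <;> simp [bfsL]

def pvAllCells : List (Int × Int) :=
  [(0,0),(0,1),(0,2),(0,3),(0,4),(1,0),(1,1),(1,2),(1,3),(1,4),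
   (2,0),(2,1),(2,2),(2,3),(2,4),(3,0),(3,1),(3,2),(3,3),(3,4),
   (4,0),(4,1),(4,2),(4,3),(4,4)]

lemma mem_allCells {p : Int × Int} (h : in_bounds p.1 p.2 = true) : p ∈ pvAllCells := by
  obtain ⟨a, b⟩ := p
  simp only [in_bounds, pvGRID_SIZE, Bool.and_eq_true, decide_eq_true_eq] at h
  obtain ⟨⟨h1, h2⟩, h3, h4⟩ := h
  interval_cases a <;> interval_cases b <;> simp [pvAllCells]

-- a Nodup key list with at most one out-of-bounds key has at most 26 elements
lemma keys_bound (l : List (Int × Int)) (hn : l.Nodup)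
    (hc : l.countP (fun k => !(in_bounds k.1 k.2)) ≤ 1) : l.length ≤ 26 := by
  have hsplit : l.length = l.countP (fun k : Int × Int => in_bounds k.1 k.2)
      + l.countP (fun k : Int × Int => !(in_bounds k.1 k.2)) := by
    have h := List.length_eq_countP_add_countP (fun k : Int × Int => in_bounds k.1 k.2) (l := l)
    simpa using h
  have hfil : l.countP (fun k : Int × Int => in_bounds k.1 k.2)
      = (l.filter (fun k : Int × Int => in_bounds k.1 k.2)).length :=
    List.countP_eq_length_filter
  have hsub : (l.filter (fun k : Int × Int => in_bounds k.1 k.2)) ⊆ pvAllCells := by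
    intro p hp
    exact mem_allCells (List.mem_filter.mp hp).2
  have hle : (l.filter (fun k : Int × Int => in_bounds k.1 k.2)).length ≤ pvAllCells.length :=
    (List.subperm_of_subset (hn.filter _) hsub).length_le
  have h25 : pvAllCells.length = 25 := rfl
  omega

-- deque BFS = level BFS, with enough fuel on both sides
lemma main_rel (ms : Int) (bl : List (Int × Int)) :
    ∀ (n fa fb : Nat) (d : PySem.Dict (Int × Int) Int) (frontier : List (Int × Int)) (s : Int),
    d.keys.Nodup →
    d.keys.countP (fun k => !(in_bounds k.1 k.2)) ≤ 1 →
    frontier.length + 5 * (26 - d.keys.length) ≤ n → n ≤ fa → n ≤ fb →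
    bfsA ms bl fa d (frontier.map (fun p => (p, s))) = bfsL ms bl fb d frontier s := by
  intro n
  induction n using Nat.strong_induction_on with
  | _ n IH =>
    intro fa fb d frontier s hnd hcnt hmu hfa hfb
    rcases frontier with _ | ⟨p0, fr⟩
    · rw [List.map_nil, bfsA_nil, bfsL_nil]
    · by_cases hs : s = ms
      · subst hs
        obtain ⟨fa', rfl⟩ : ∃ fa', fa = fa' + (p0 :: fr).length :=
          ⟨fa - (p0 :: fr).length, by simp at hmu ⊢; omega⟩
        rw [bfsA_skip]
        cases fb <;> simp [bfsL]
      · obtain ⟨fa', rfl⟩ : ∃ fa', fa = fa' + (p0 :: fr).length :=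
          ⟨fa - (p0 :: fr).length, by simp at hmu ⊢; omega⟩
        obtain ⟨fb', rfl⟩ : ∃ fb', fb = fb' + 1 := ⟨fb - 1, by simp at hmu ⊢; omega⟩
        obtain ⟨ns, h1, h2, h3, h4, h5⟩ := level_rel ms bl s hs (p0 :: fr) d [] fa'
        simp only [List.map_nil, List.append_nil] at h1
        simp only [List.nil_append] at h2
        have hkeys : (List.foldl (stepL bl s) (d, []) (p0 :: fr)).1.keys = d.keys ++ ns := by
          simp only [PySem.Dict.keys, h3, List.map_append]
          simp [Function.comp_def]
        have hnd' : (List.foldl (stepL bl s) (d, []) (p0 :: fr)).1.keys.Nodup := h5 hnd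
        have hcnt' : (List.foldl (stepL bl s) (d, []) (p0 :: fr)).1.keys.countP
            (fun k => !(in_bounds k.1 k.2)) ≤ 1 := by
          rw [hkeys, List.countP_append]
          have : ns.countP (fun k => !(in_bounds k.1 k.2)) = 0 := by
            rw [List.countP_eq_zero]
            intro p hp
            simp [h4 p hp]
          omega
        have h26 : d.keys.length + ns.length ≤ 26 := by
          have := keys_bound _ hnd' hcnt'
          rw [hkeys, List.length_append] at this
          exact this
        have hlen : (p0 :: fr).length = fr.length + 1 := rfl
        have hIH := IH (ns.length + 5 * (26 - (d.keys.length + ns.length)))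
          (by omega)
          fa' fb' (List.foldl (stepL bl s) (d, []) (p0 :: fr)).1 ns (s + 1)
          hnd' hcnt'
          (by rw [hkeys, List.length_append])
          (by omega) (by omega)
        have hnot : ¬((p0 :: fr) = [] ∨ s = ms) := by simp [hs]
        have hB : bfsL ms bl (fb' + 1) d (p0 :: fr) s
            = bfsL ms bl fb' (List.foldl (stepL bl s) (d, []) (p0 :: fr)).1
                (List.foldl (stepL bl s) (d, []) (p0 :: fr)).2 (s + 1) := by
          simp only [bfsL]; rw [if_neg hnot]
        rw [h1, h2, hIH, hB, h2]

-- ===================== level BFS = closure iteration =====================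

-- an entry is saturated in a dict: all its eligible neighbours are already recorded
def SatEntry (ms : Int) (bl : List (Int × Int)) (d : PySem.Dict (Int × Int) Int)
    (e : (Int × Int) × Int) : Prop :=
  e.2 ≠ ms → ∀ dd ∈ pvDIRECTIONS,
    (in_bounds (e.1.1 + dd.1) (e.1.2 + dd.2)
      && !(decide ((e.1.1 + dd.1, e.1.2 + dd.2) ∈ bl))) = true →
    d.contains (e.1.1 + dd.1, e.1.2 + dd.2) = true

lemma contains_mono_insert (d : PySem.Dict (Int × Int) Int) (k k' : Int × Int) (v : Int)
    (h : d.contains k = true) : (d.insert k' v).contains k = true := by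
  rw [PySem.Dict.contains_insert, h]; simp

lemma nbr_mono (bl : List (Int × Int)) (dist : Int) (pos : Int × Int) :
    ∀ (dirs : List (Int × Int)) (d : PySem.Dict (Int × Int) Int) (k : Int × Int),
    d.contains k = true → (List.foldl (nbrB bl dist pos) d dirs).contains k = true := by
  intro dirs
  induction dirs with
  | nil => intro d k h; exact h
  | cons dd dirs ih =>
    intro d k h
    simp only [List.foldl_cons, nbrB]
    split_ifs with hg
    · exact ih _ k (contains_mono_insert d k _ _ h)
    · exact ih d k h

lemma nbr_noop (bl : List (Int × Int)) (dist : Int) (pos : Int × Int) :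
    ∀ (dirs : List (Int × Int)) (d : PySem.Dict (Int × Int) Int),
    (∀ dd ∈ dirs,
      (in_bounds (pos.1 + dd.1) (pos.2 + dd.2)
        && !(decide ((pos.1 + dd.1, pos.2 + dd.2) ∈ bl))) = true →
      d.contains (pos.1 + dd.1, pos.2 + dd.2) = true) →
    List.foldl (nbrB bl dist pos) d dirs = d := by
  intro dirs
  induction dirs with
  | nil => intro d _; rfl
  | cons dd dirs ih =>
    intro d hsat
    simp only [List.foldl_cons, nbrB]
    have hstep : (if (in_bounds (pos.1 + dd.1) (pos.2 + dd.2)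
        && !(decide ((pos.1 + dd.1, pos.2 + dd.2) ∈ bl))
        && !(d.contains (pos.1 + dd.1, pos.2 + dd.2))) = true then
        d.insert (pos.1 + dd.1, pos.2 + dd.2) (dist + 1) else d) = d := by
      by_cases he : (in_bounds (pos.1 + dd.1) (pos.2 + dd.2)
          && !(decide ((pos.1 + dd.1, pos.2 + dd.2) ∈ bl))) = true
      · rw [if_neg]
        rw [hsat dd (by simp) he]
        simp [he]
      · rw [if_neg]
        intro hc
        simp only [Bool.and_eq_true] at hc he
        exact he ⟨hc.1.1, hc.1.2⟩
    rw [hstep]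
    exact ih d (fun dd' hdd' => hsat dd' (by simp [hdd']))

lemma entry_noop (ms : Int) (bl : List (Int × Int)) (d : PySem.Dict (Int × Int) Int)
    (e : (Int × Int) × Int) (hsat : SatEntry ms bl d e) : entryB ms bl d e = d := by
  unfold entryB
  split_ifs with hne
  · exact nbr_noop bl e.2 e.1 pvDIRECTIONS d (fun dd hdd hg => hsat hne dd hdd hg)
  · rfl

lemma sat_mono (ms : Int) (bl : List (Int × Int)) (d d' : PySem.Dict (Int × Int) Int)
    (e : (Int × Int) × Int)
    (hmono : ∀ k, d.contains k = true → d'.contains k = true)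
    (hsat : SatEntry ms bl d e) : SatEntry ms bl d' e :=
  fun hne dd hdd hg => hmono _ (hsat hne dd hdd hg)

lemma fold_entry_noop (ms : Int) (bl : List (Int × Int)) :
    ∀ (pre : List ((Int × Int) × Int)) (d : PySem.Dict (Int × Int) Int),
    (∀ e ∈ pre, SatEntry ms bl d e) →
    List.foldl (entryB ms bl) d pre = d := by
  intro pre
  induction pre with
  | nil => intro d _; rfl
  | cons e pre ih =>
    intro d hsat
    simp only [List.foldl_cons]
    rw [entry_noop ms bl d e (hsat e (by simp))]
    exact ih d (fun e' he' => hsat e' (by simp [he']))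

lemma fold_entry_ms (ms : Int) (bl : List (Int × Int)) :
    ∀ (ns : List (Int × Int)) (d : PySem.Dict (Int × Int) Int),
    List.foldl (entryB ms bl) d (ns.map (fun p => (p, ms))) = d := by
  intro ns
  induction ns with
  | nil => intro d; rfl
  | cons p ns ih =>
    intro d
    simp only [List.map_cons, List.foldl_cons, entryB]
    rw [if_neg (by simp)]
    exact ih d

-- projection: the level fold's dict component is the plain nbrB fold
lemma proj_dirs (bl : List (Int × Int)) (s : Int) (pos : Int × Int) :
    ∀ (dirs : List (Int × Int)) (st : PySem.Dict (Int × Int) Int × List (Int × Int)),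
    (List.foldl (bodyL bl s pos) st dirs).1 = List.foldl (nbrB bl s pos) st.1 dirs := by
  intro dirs
  induction dirs with
  | nil => intro st; rfl
  | cons dd dirs ih =>
    intro st
    simp only [List.foldl_cons, bodyL, nbrB]
    split_ifs with hg
    · exact ih _
    · exact ih st

lemma proj_level (bl : List (Int × Int)) (s : Int) :
    ∀ (ns : List (Int × Int)) (st : PySem.Dict (Int × Int) Int × List (Int × Int)),
    (List.foldl (stepL bl s) st ns).1
      = List.foldl (fun d p => List.foldl (nbrB bl s p) d pvDIRECTIONS) st.1 ns := by
  intro ns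
  induction ns with
  | nil => intro st; rfl
  | cons p ns ih =>
    intro st
    simp only [List.foldl_cons]
    rw [ih (stepL bl s st p)]
    congr 1
    exact proj_dirs bl s p pvDIRECTIONS st

lemma entry_map (ms : Int) (bl : List (Int × Int)) (s : Int) (hs : s ≠ ms) :
    ∀ (ns : List (Int × Int)) (d : PySem.Dict (Int × Int) Int),
    List.foldl (entryB ms bl) d (ns.map (fun p => (p, s)))
      = List.foldl (fun d p => List.foldl (nbrB bl s p) d pvDIRECTIONS) d ns := by
  intro ns
  induction ns with
  | nil => intro d; rfl
  | cons p ns ih =>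
    intro d
    simp only [List.map_cons, List.foldl_cons, entryB]
    rw [if_pos (by simpa using hs)]
    exact ih _

lemma F_mono (bl : List (Int × Int)) (s : Int) :
    ∀ (ns : List (Int × Int)) (d : PySem.Dict (Int × Int) Int) (k : Int × Int),
    d.contains k = true →
    (List.foldl (fun d p => List.foldl (nbrB bl s p) d pvDIRECTIONS) d ns).contains k = true := by
  intro ns
  induction ns with
  | nil => intro d k h; exact h
  | cons p ns ih =>
    intro d k h
    simp only [List.foldl_cons]
    exact ih _ k (nbr_mono bl s p pvDIRECTIONS d k h)

-- after a cell's own direction fold, all its eligible neighbours are recorded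
lemma sat_dirs (bl : List (Int × Int)) (s : Int) (pos : Int × Int) :
    ∀ (dirs : List (Int × Int)) (d : PySem.Dict (Int × Int) Int) (dd : Int × Int),
    dd ∈ dirs →
    (in_bounds (pos.1 + dd.1) (pos.2 + dd.2)
      && !(decide ((pos.1 + dd.1, pos.2 + dd.2) ∈ bl))) = true →
    (List.foldl (nbrB bl s pos) d dirs).contains (pos.1 + dd.1, pos.2 + dd.2) = true := by
  intro dirs
  induction dirs with
  | nil => intro d dd h; simp at h
  | cons dd0 dirs ih =>
    intro d dd hdd hg
    simp only [List.foldl_cons]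
    rcases List.mem_cons.mp hdd with rfl | hdd'
    · have hcont : (nbrB bl s pos d dd).contains (pos.1 + dd.1, pos.2 + dd.2) = true := by
        simp only [nbrB]
        by_cases hc : d.contains (pos.1 + dd.1, pos.2 + dd.2) = true
        · split_ifs with h'
          · exact contains_mono_insert d _ _ _ hc
          · exact hc
        · rw [if_pos (by simp only [Bool.and_eq_true] at hg ⊢; simp [hg.1, hg.2, hc])]
          exact PySem.Dict.contains_insert_self d _ _
      exact nbr_mono bl s pos dirs _ _ hcont
    · exact ih (nbrB bl s pos d dd0) dd hdd' hg

lemma sat_level (ms : Int) (bl : List (Int × Int)) (s : Int) :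
    ∀ (ns : List (Int × Int)) (d : PySem.Dict (Int × Int) Int) (p : Int × Int),
    p ∈ ns →
    SatEntry ms bl (List.foldl (fun d p => List.foldl (nbrB bl s p) d pvDIRECTIONS) d ns) (p, s) := by
  intro ns
  induction ns with
  | nil => intro d p h; simp at h
  | cons p0 ns ih =>
    intro d p hp
    rcases List.mem_cons.mp hp with rfl | hp'
    · intro _ dd hdd hg
      simp only [List.foldl_cons]
      exact F_mono bl s ns _ _ (sat_dirs bl s p pvDIRECTIONS d dd hdd hg)
    · simp only [List.foldl_cons]
      exact ih _ p hp'

-- the closure iteration computes exactly the level-synchronous BFS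
lemma closure_rel (ms : Int) (bl : List (Int × Int)) :
    ∀ (n fL f2 : Nat) (d : PySem.Dict (Int × Int) Int) (pre : List ((Int × Int) × Int))
      (ns : List (Int × Int)) (s : Int),
    d.items = pre ++ ns.map (fun p => (p, s)) →
    (∀ e ∈ pre, SatEntry ms bl d e) →
    d.keys.Nodup →
    d.keys.countP (fun k => !(in_bounds k.1 k.2)) ≤ 1 →
    (26 - d.keys.length) + 2 ≤ n → n ≤ fL → n ≤ f2 →
    bfsL ms bl fL d ns s = closureB ms bl f2 d := by
  intro n
  induction n using Nat.strong_induction_on with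
  | _ n IH =>
    intro fL f2 d pre ns s hitems hsat hnd hcnt hn hfL hf2
    obtain ⟨f2', rfl⟩ : ∃ f2', f2 = f2' + 1 := ⟨f2 - 1, by omega⟩
    by_cases hs : s = ms
    · have hpass : List.foldl (entryB ms bl) d d.items = d := by
        rw [hitems, List.foldl_append, fold_entry_noop ms bl pre d hsat, hs, fold_entry_ms]
      have hstable : (List.foldl (entryB ms bl) d d.items).size = d.items.length := by
        rw [hpass]; rfl
      have hclo : closureB ms bl (f2' + 1) d = d := by
        simp only [closureB]
        rw [if_pos hstable, hpass]
      rw [hclo]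
      rcases ns with _ | ⟨p0, fr⟩
      · exact bfsL_nil ms bl fL d s
      · cases fL with
        | zero => rfl
        | succ fL' => simp [bfsL, hs]
    · rcases ns with _ | ⟨p0, fr⟩
      · have hpass : List.foldl (entryB ms bl) d d.items = d := by
          rw [hitems]; simp only [List.map_nil, List.append_nil]
          exact fold_entry_noop ms bl pre d hsat
        have hstable : (List.foldl (entryB ms bl) d d.items).size = d.items.length := by
          rw [hpass]; rfl
        have hclo : closureB ms bl (f2' + 1) d = d := by
          simp only [closureB]
          rw [if_pos hstable, hpass]
        rw [hclo, bfsL_nil]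
      · -- expanding level
        obtain ⟨fL', rfl⟩ : ∃ fL', fL = fL' + 1 := ⟨fL - 1, by omega⟩
        obtain ⟨nsNew, _h1, h2, h3, h4, h5⟩ := level_rel ms bl s hs (p0 :: fr) d [] fL'
        simp only [List.nil_append] at h2
        set st := List.foldl (stepL bl s) (d, []) (p0 :: fr) with hst
        -- the pass computes st.1
        have hpass : List.foldl (entryB ms bl) d d.items = st.1 := by
          rw [hitems, List.foldl_append, fold_entry_noop ms bl pre d hsat,
            entry_map ms bl s hs, hst, proj_level]
        have hkeys : st.1.keys = d.keys ++ nsNew := by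
          simp only [PySem.Dict.keys, h3, List.map_append]
          simp [Function.comp_def]
        have hnd' : st.1.keys.Nodup := h5 hnd
        have hcnt' : st.1.keys.countP (fun k => !(in_bounds k.1 k.2)) ≤ 1 := by
          rw [hkeys, List.countP_append]
          have : nsNew.countP (fun k => !(in_bounds k.1 k.2)) = 0 := by
            rw [List.countP_eq_zero]
            intro p hp
            simp [h4 p hp]
          omega
        have h26 : d.keys.length + nsNew.length ≤ 26 := by
          have := keys_bound _ hnd' hcnt'
          rw [hkeys, List.length_append] at this
          exact this
        have hsize : st.1.size = d.items.length + nsNew.length := by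
          show st.1.items.length = _
          rw [h3, List.length_append, List.length_map]
        have hbfsL : bfsL ms bl (fL' + 1) d (p0 :: fr) s = bfsL ms bl fL' st.1 st.2 (s + 1) := by
          simp only [bfsL]
          rw [if_neg (by simp [hs])]
        rcases nsNew with _ | ⟨q0, qs⟩
        · -- pass added nothing: both sides stop with st.1
          have hstable : (List.foldl (entryB ms bl) d d.items).size = d.items.length := by
            rw [hpass, hsize]; simp
          have hclo : closureB ms bl (f2' + 1) d = st.1 := by
            simp only [closureB]
            rw [if_pos hstable, hpass]
          rw [hclo, hbfsL, h2, bfsL_nil]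
        · -- pass grew the dict: recurse
          have hstable : ¬ (List.foldl (entryB ms bl) d d.items).size = d.items.length := by
            rw [hpass, hsize]; simp
          have hclo : closureB ms bl (f2' + 1) d = closureB ms bl f2' st.1 := by
            simp only [closureB]
            rw [if_neg hstable, hpass]
          -- saturation of all old entries in st.1
          have hmono : ∀ k, d.contains k = true → st.1.contains k = true := by
            intro k hk
            rw [hst, proj_level]
            exact F_mono bl s (p0 :: fr) d k hk
          have hsat' : ∀ e ∈ pre ++ (p0 :: fr).map (fun p => (p, s)), SatEntry ms bl st.1 e := by
            intro e he
            rcases List.mem_append.mp he with he | he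
            · exact sat_mono ms bl d st.1 e hmono (hsat e he)
            · obtain ⟨p, hp, rfl⟩ := List.mem_map.mp he
              rw [hst, proj_level]
              exact sat_level ms bl s (p0 :: fr) d p hp
          have hdlen : d.keys.length = d.items.length := by
            simp [PySem.Dict.keys]
          have hstlen : st.1.keys.length = d.keys.length + (q0 :: qs).length := by
            rw [hkeys, List.length_append]
          have hIH := IH (n - 1) (by omega) fL' f2' st.1
            (pre ++ (p0 :: fr).map (fun p => (p, s))) (q0 :: qs) (s + 1)
            (by rw [h3, hitems])
            hsat' hnd' hcnt'
            (by simp only [List.length_cons] at hstlen h26 ⊢; omega)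
            (by omega) (by omega)
          rw [hclo, hbfsL, h2, hIH]

-- ===== VERDICT (by name: the statement is the Claim_ definition above) =====
theorem get_reachable_with_dist_spec : Claim_equal_get_reachable_with_dist := by
  intro fp ms bl _
  unfold Spec_get_reachable_with_dist get_reachable_with_dist get_reachable_with_dist_alt
  have hkeys : (PySem.Dict.ofList [(fp, (0 : Int))]).keys = [fp] := rfl
  have hAL : bfsA ms bl 131 (PySem.Dict.ofList [(fp, 0)]) [(fp, 0)]
      = bfsL ms bl 131 (PySem.Dict.ofList [(fp, 0)]) [fp] 0 := by
    have h := main_rel ms bl 126 131 131 (PySem.Dict.ofList [(fp, 0)]) [fp] 0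
      (by rw [hkeys]; simp)
      (by rw [hkeys]; cases h : (!(in_bounds fp.1 fp.2)) <;> simp [h])
      (by rw [hkeys]; simp)
      (by omega) (by omega)
    simpa using h
  have hLC : bfsL ms bl 131 (PySem.Dict.ofList [(fp, 0)]) [fp] 0
      = closureB ms bl 40 (PySem.Dict.ofList [(fp, 0)]) := by
    apply closure_rel ms bl 27 131 40 (PySem.Dict.ofList [(fp, 0)]) [] [fp] 0
    · rfl
    · intro e he; simp at he
    · rw [hkeys]; simp
    · rw [hkeys]; cases h : (!(in_bounds fp.1 fp.2)) <;> simp [h]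
    · rw [hkeys]; simp
    · omega
    · omega
  show (bfsA ms bl 131 (PySem.Dict.ofList [(fp, 0)]) [(fp, 0)]).items.map
        (fun p => (p.1.1, p.1.2, p.2))
      = (closureB ms bl 40 (PySem.Dict.ofList [(fp, 0)])).items.map
        (fun p => (p.1.1, p.1.2, p.2))
  rw [hAL, hLC]
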